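-- pv_equiv track=rewrite | github.com/Nareeek/Codesignal_tasks | bool/isOneSwapEnough.py | isOneSwapEnough
-- ===== SOURCE A (Python) =====
-- def f(s):
--     for i in range(len(s) // 2):
--         if s[i] != s[len(s) - i - 1]:
--             return False
--     return True
--
-- def isOneSwapEnough(s):
--     ok = False
--     c = list(s)
--     for i in range(len(c)):
--         for j in range(i, len(c)):
--             c[i], c[j] = c[j], c[i]
--             if f(''.join(c)):
--                 ok = True
--             c[i], c[j] = c[j], c[i]
--     return ok
-- ===== SOURCE B (Python) =====
-- def isOneSwapEnough(s):
--     n = len(s)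
--     bad = [i for i in range(n // 2) if s[i] != s[n - 1 - i]]
--     if len(bad) == 0:
--         return True
--     if len(bad) == 1:
--         i = bad[0]
--         return n % 2 == 1 and s[n // 2] in (s[i], s[n - 1 - i])
--     if len(bad) == 2:
--         i, j = bad
--         a1, b1 = s[i], s[n - 1 - i]
--         a2, b2 = s[j], s[n - 1 - j]
--         return (a1 == a2 and b1 == b2) or (a1 == b2 and a2 == b1)
--     return False
-- ===== Notes on version B (the rewrite author's own statement) =====
-- stated objective: faster
-- what changed: A tries every swap (i,j) and re-checks the whole string for palindromicity (O(n^3)); B makes one pass collecting the mismatched symmetric pairs and decides fixability from at most two of them by a constant-size case analysis (O(n)).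
-- intended difference: On the empty string A returns False (its swap loops never run so ok is never set), while B returns True: the empty string is already a palindrome, and A itself returns True for every nonempty palindrome without needing a real swap, so False on '' is an artefact of A's loop structure. — e.g. on isOneSwapEnough(""): A returns false, B returns true
import Mathlib
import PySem

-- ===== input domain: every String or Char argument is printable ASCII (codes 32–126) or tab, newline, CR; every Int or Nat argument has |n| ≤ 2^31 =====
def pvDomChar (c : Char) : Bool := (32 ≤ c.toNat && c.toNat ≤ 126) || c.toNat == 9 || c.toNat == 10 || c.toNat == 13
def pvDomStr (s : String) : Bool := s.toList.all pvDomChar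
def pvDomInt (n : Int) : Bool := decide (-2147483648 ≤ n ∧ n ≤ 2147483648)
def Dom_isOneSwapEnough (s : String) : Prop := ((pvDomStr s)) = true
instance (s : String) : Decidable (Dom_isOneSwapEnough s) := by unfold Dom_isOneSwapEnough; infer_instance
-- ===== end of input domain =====

-- B replaces A's try-every-swap-and-recheck scan by a single pass over the symmetric pairs
-- and a constant-size case analysis of the (at most two relevant) mismatched pairs.

-- ===== PORT A =====
-- helper f of A: palindrome test comparing s[i] with s[len(s)-i-1] for i in range(len(s)//2)
def pvF (s : String) : Bool :=
  (PySem.List.pyRange 0 (PySem.Int.floordiv (PySem.Str.len s) 2) 1).all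
    (fun i => PySem.Str.pyGet? s i == PySem.Str.pyGet? s (PySem.Str.len s - i - 1))

-- c[i], c[j] = c[j], c[i]  (simultaneous assignment; indices always in range in A's loops)
def pvSwap (c : List Char) (i j : Nat) : List Char :=
  (c.set i (c.getD j ' ')).set j (c.getD i ' ')

def isOneSwapEnough (s : String) : Bool :=
  let c := s.toList
  (List.range c.length).foldl (fun ok i =>
    (List.range' i (c.length - i)).foldl (fun ok j =>
      if pvF (String.ofList (pvSwap c i j)) then true else ok) ok) false

-- ===== PORT B =====
-- bad = [i for i in range(n // 2) if s[i] != s[n - 1 - i]]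
def pvBad (c : List Char) : List Nat :=
  (List.range (c.length / 2)).filter
    (fun i => !(c.getD i ' ' == c.getD (c.length - 1 - i) ' '))

def isOneSwapEnough_alt (s : String) : Bool :=
  match pvBad s.toList with
  | [] => true
  | [i] => decide (s.toList.length % 2 = 1) &&
      (s.toList.getD (s.toList.length / 2) ' ' == s.toList.getD i ' ' ||
       s.toList.getD (s.toList.length / 2) ' ' == s.toList.getD (s.toList.length - 1 - i) ' ')
  | [i, j] =>
      (s.toList.getD i ' ' == s.toList.getD j ' ' &&
       s.toList.getD (s.toList.length - 1 - i) ' ' == s.toList.getD (s.toList.length - 1 - j) ' ') ||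
      (s.toList.getD i ' ' == s.toList.getD (s.toList.length - 1 - j) ' ' &&
       s.toList.getD j ' ' == s.toList.getD (s.toList.length - 1 - i) ' ')
  | _ => false

-- ===== PRECONDITION & SPEC =====
-- On the empty string A returns False (its swap loops never run so ok is never set), while B
-- returns True: "" is already a palindrome, and A itself returns True for every nonempty
-- palindrome without a real swap, so False on "" is an artefact of A's loop structure.
def D_isOneSwapEnough (s : String) : Prop := s = ""
instance (s : String) : Decidable (D_isOneSwapEnough s) := by unfold D_isOneSwapEnough; infer_instance

def Spec_isOneSwapEnough (s : String) (out : Bool) : Prop :=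
  ¬ D_isOneSwapEnough s → out = isOneSwapEnough_alt s
instance (s : String) (out : Bool) : Decidable (Spec_isOneSwapEnough s out) := by
  unfold Spec_isOneSwapEnough; infer_instance

def pvDiffWitness_isOneSwapEnough : String := ""
def pvDiffWitnessOut_isOneSwapEnough : Bool × Bool := (false, true)

-- ===== CLAIM (what is proved, stated in full; the proofs are below) =====
def Claim_unchanged_isOneSwapEnough : Prop :=
  ∀ (s : String), Dom_isOneSwapEnough s → Spec_isOneSwapEnough s (isOneSwapEnough s)
def Claim_changed_isOneSwapEnough : Prop :=
  Dom_isOneSwapEnough (pvDiffWitness_isOneSwapEnough) ∧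
  D_isOneSwapEnough (pvDiffWitness_isOneSwapEnough) ∧
  isOneSwapEnough (pvDiffWitness_isOneSwapEnough) = pvDiffWitnessOut_isOneSwapEnough.1 ∧
  isOneSwapEnough_alt (pvDiffWitness_isOneSwapEnough) = pvDiffWitnessOut_isOneSwapEnough.2 ∧
  pvDiffWitnessOut_isOneSwapEnough.1 ≠ pvDiffWitnessOut_isOneSwapEnough.2
def Claim_exact_isOneSwapEnough : Prop :=
  ∀ (s : String), Dom_isOneSwapEnough s → D_isOneSwapEnough s →
    isOneSwapEnough s ≠ isOneSwapEnough_alt s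

-- ===== LEMMAS AND PROOFS =====

-- value at position k after swapping positions i and j
def pvS (c : List Char) (i j k : Nat) : Char :=
  if k = j then c.getD i ' ' else if k = i then c.getD j ' ' else c.getD k ' '

-- the palindrome property A's helper f decides
def pvPal (c : List Char) : Prop :=
  ∀ k, k < c.length / 2 → c.getD k ' ' = c.getD (c.length - 1 - k) ' '

-- B's decision, as a Prop
def pvCond (c : List Char) : Prop :=
  match pvBad c with
  | [] => True
  | [k] => c.length % 2 = 1 ∧
      (c.getD (c.length / 2) ' ' = c.getD k ' ' ∨
       c.getD (c.length / 2) ' ' = c.getD (c.length - 1 - k) ' ')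
  | [k1, k2] =>
      (c.getD k1 ' ' = c.getD k2 ' ' ∧
       c.getD (c.length - 1 - k1) ' ' = c.getD (c.length - 1 - k2) ' ') ∨
      (c.getD k1 ' ' = c.getD (c.length - 1 - k2) ' ' ∧
       c.getD k2 ' ' = c.getD (c.length - 1 - k1) ' ')
  | _ => False

lemma pvSwap_length (c : List Char) (i j : Nat) : (pvSwap c i j).length = c.length := by
  simp [pvSwap]

lemma pvSwap_getD (c : List Char) (i j : Nat) (hi : i < c.length) (hj : j < c.length) (k : Nat) :
    (pvSwap c i j).getD k ' ' = pvS c i j k := by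
  unfold pvSwap pvS
  by_cases hkj : k = j
  · subst hkj
    rw [List.getD_eq_getElem?_getD, List.getElem?_set_self (by simpa using hj),
      Option.getD_some, if_pos rfl]
  · rw [List.getD_eq_getElem?_getD, List.getElem?_set_ne (fun h => hkj h.symm)]
    by_cases hki : k = i
    · subst hki
      rw [List.getElem?_set_self hi, Option.getD_some, if_neg hkj, if_pos rfl]
    · rw [List.getElem?_set_ne (fun h => hki h.symm), ← List.getD_eq_getElem?_getD,
        if_neg hkj, if_neg hki]

lemma pvS_j (c : List Char) (i j : Nat) : pvS c i j j = c.getD i ' ' := by simp [pvS]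

lemma pvS_i (c : List Char) (i j : Nat) (h : i ≠ j) : pvS c i j i = c.getD j ' ' := by
  simp [pvS, h]

lemma pvS_of_ne (c : List Char) (i j k : Nat) (h1 : k ≠ j) (h2 : k ≠ i) :
    pvS c i j k = c.getD k ' ' := by simp [pvS, h1, h2]

-- A's helper f decides pvPal
lemma pvF_iff (c : List Char) : pvF (String.ofList c) = true ↔ pvPal c := by
  unfold pvF pvPal
  rw [PySem.List.pyRange_one, List.all_map, List.all_eq_true]
  simp only [PySem.Str.len_eq, String.toList_ofList, PySem.Str.pyGet?_eq, Function.comp,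
    List.mem_range, sub_zero]
  have hM : ((PySem.Int.floordiv (c.length : Int) 2)).toNat = c.length / 2 := by
    have h2 : PySem.Int.floordiv (c.length : Int) 2 = ((c.length / 2 : Nat) : Int) :=
      PySem.Int.floordiv_natCast c.length 2
    rw [h2, Int.toNat_natCast]
  rw [hM]
  have key : ∀ k, k < c.length / 2 →
      ((PySem.Chars.pyGet? c (0 + (k : Int)) ==
        PySem.Chars.pyGet? c ((c.length : Int) - (0 + (k : Int)) - 1)) = true ↔
        c.getD k ' ' = c.getD (c.length - 1 - k) ' ') := by
    intro k hk
    have hkn : k < c.length := by omega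
    have hkn2 : c.length - 1 - k < c.length := by omega
    have e1 : (0 : Int) + (k : Int) = ((k : Nat) : Int) := by ring
    have e2 : (c.length : Int) - (k : Int) - 1 = ((c.length - 1 - k : Nat) : Int) := by omega
    rw [e1, e2]
    show (PySem.List.pyGet? c ((k : Nat) : Int) ==
      PySem.List.pyGet? c (((c.length - 1 - k : Nat)) : Int)) = true ↔ _
    rw [PySem.List.pyGet?_natCast, PySem.List.pyGet?_natCast,
      List.getElem?_eq_getElem hkn, List.getElem?_eq_getElem hkn2,
      List.getD_eq_getElem _ _ hkn, List.getD_eq_getElem _ _ hkn2]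
    simp
  constructor
  · intro h k hk
    exact (key k hk).mp (h k hk)
  · intro h k hk
    exact (key k hk).mpr (h k hk)

-- A's nested loops compute an existential over swaps
lemma foldl_if {α : Type} (p : α → Bool) (xs : List α) (b : Bool) :
    xs.foldl (fun ok x => if p x then true else ok) b = (b || xs.any p) := by
  induction xs generalizing b with
  | nil => simp
  | cons x xs ih =>
    rw [List.foldl_cons, ih]
    cases hpx : p x <;> cases b <;> simp [hpx]

lemma foldl_or {α : Type} (q : α → Bool) (xs : List α) (b : Bool) :
    xs.foldl (fun ok x => ok || q x) b = (b || xs.any q) := by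
  induction xs generalizing b with
  | nil => simp
  | cons x xs ih =>
    rw [List.foldl_cons, ih]
    cases hpx : q x <;> cases b <;> simp [hpx]

lemma isOneSwapEnough_iff (s : String) :
    isOneSwapEnough s = true ↔
      ∃ i j, i < s.toList.length ∧ i ≤ j ∧ j < s.toList.length ∧
        pvPal (pvSwap s.toList i j) := by
  unfold isOneSwapEnough
  have h1 : ∀ (i : Nat) (b : Bool),
      (List.range' i (s.toList.length - i)).foldl (fun ok j =>
        if pvF (String.ofList (pvSwap s.toList i j)) then true else ok) b
      = (b || (List.range' i (s.toList.length - i)).any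
          (fun j => pvF (String.ofList (pvSwap s.toList i j)))) := by
    intro i b; exact foldl_if _ _ _
  simp only [h1]
  rw [foldl_or]
  simp only [Bool.false_or, List.any_eq_true, List.mem_range, List.mem_range'_1]
  constructor
  · rintro ⟨i, hi, j, ⟨hij, hj⟩, hp⟩
    exact ⟨i, j, hi, hij, by omega, (pvF_iff _).mp hp⟩
  · rintro ⟨i, j, hi, hij, hj, hp⟩
    exact ⟨i, hi, j, ⟨hij, by omega⟩, (pvF_iff _).mpr hp⟩

lemma pal_swap_iff (c : List Char) (i j : Nat) (hi : i < c.length) (hj : j < c.length) :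
    pvPal (pvSwap c i j) ↔
      ∀ k, k < c.length / 2 → pvS c i j k = pvS c i j (c.length - 1 - k) := by
  unfold pvPal
  rw [pvSwap_length]
  refine forall_congr' (fun k => imp_congr Iff.rfl ?_)
  rw [pvSwap_getD c i j hi hj, pvSwap_getD c i j hi hj]

lemma mem_pvBad (c : List Char) (k : Nat) :
    k ∈ pvBad c ↔ k < c.length / 2 ∧ c.getD k ' ' ≠ c.getD (c.length - 1 - k) ' ' := by
  simp [pvBad, List.mem_filter, List.mem_range]

lemma pvBad_pairwise (c : List Char) : (pvBad c).Pairwise (· < ·) := by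
  exact (List.pairwise_lt_range).sublist List.filter_sublist

-- B decides pvCond
lemma alt_iff (s : String) : isOneSwapEnough_alt s = true ↔ pvCond s.toList := by
  unfold isOneSwapEnough_alt pvCond
  rcases hb : pvBad s.toList with _ | ⟨k, _ | ⟨k2, _ | _⟩⟩ <;> simp

lemma not_bad (c : List Char) (p : Nat) (hp : p < c.length / 2) (h : p ∉ pvBad c) :
    c.getD p ' ' = c.getD (c.length - 1 - p) ' ' := by
  by_contra hne
  exact h ((mem_pvBad c p).2 ⟨hp, hne⟩)

-- forward: a palindromizing swap yields B's condition
lemma forward (c : List Char) (i j : Nat) (hi : i < c.length) (hij0 : i ≤ j)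
    (hj : j < c.length) (hp : pvPal (pvSwap c i j)) : pvCond c := by
  have hn : 0 < c.length := by omega
  rw [pal_swap_iff c i j hi hj] at hp
  unfold pvCond
  by_cases heq : i = j
  · -- identity swap: the string itself is a palindrome, no mismatched pair
    subst heq
    have hS : ∀ t, pvS c i i t = c.getD t ' ' := by
      intro t; unfold pvS; split_ifs <;> simp_all
    have hbad : pvBad c = [] := by
      rw [List.eq_nil_iff_forall_not_mem]
      intro p hpm
      obtain ⟨hp2, hgp⟩ := (mem_pvBad c p).1 hpm
      have h := hp p hp2
      rw [hS, hS] at h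
      exact hgp h
    rw [hbad]
    exact trivial
  have hij : i < j := lt_of_le_of_ne hij0 heq
  -- every mismatched pair must contain a swapped endpoint
  have hF1 : ∀ k, k ∈ pvBad c →
      (k = i ∨ c.length - 1 - k = i) ∨ (k = j ∨ c.length - 1 - k = j) := by
    intro k hk
    obtain ⟨hk2, hgk⟩ := (mem_pvBad c k).1 hk
    by_contra hcon
    push Not at hcon
    obtain ⟨⟨h1, h2⟩, ⟨h3, h4⟩⟩ := hcon
    have h := hp k hk2
    rw [pvS_of_ne c _ _ _ h3 h1, pvS_of_ne c _ _ _ h4 h2] at h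
    exact hgk h
  rcases hb : pvBad c with _ | ⟨k, _ | ⟨k2, _ | ⟨k3, rest⟩⟩⟩
  · exact trivial
  · -- exactly one mismatched pair
    have hkm : k ∈ pvBad c := by rw [hb]; exact List.mem_singleton_self k
    obtain ⟨hk, hgk⟩ := (mem_pvBad c k).1 hkm
    have honly : ∀ p, p < c.length / 2 → p ≠ k →
        c.getD p ' ' = c.getD (c.length - 1 - p) ' ' := by
      intro p hp2 hpk
      exact not_bad c p hp2 (by rw [hb]; simp [hpk])
    by_cases h1 : i = k
    · -- the swap moves position k; the other end must be the middle
      subst h1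
      have hjne : j ≠ c.length - 1 - i := by
        intro he
        have h := hp i hk
        rw [← he, pvS_i c _ _ (by omega), pvS_j] at h
        exact hgk (by rw [he] at h; exact h.symm)
      have hj1 : c.getD j ' ' = c.getD (c.length - 1 - i) ' ' := by
        have h := hp i hk
        rw [pvS_i c _ _ (by omega), pvS_of_ne c _ _ _ (by omega) (by omega)] at h
        exact h
      have hjge : c.length / 2 ≤ j := by
        by_contra hltj
        push Not at hltj
        have hoj := honly j hltj (by omega)
        have h := hp j hltj
        rw [pvS_j, pvS_of_ne c _ _ _ (by omega) (by omega)] at h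
        exact hgk (h.trans (hoj.symm.trans hj1))
      have hpge : c.length / 2 ≤ c.length - 1 - j := by
        by_contra hltp
        push Not at hltp
        have hpk2 : c.length - 1 - j ≠ i := by
          intro he
          exact hjne (by omega)
        have hop := honly (c.length - 1 - j) hltp hpk2
        rw [show c.length - 1 - (c.length - 1 - j) = j by omega] at hop
        have h := hp (c.length - 1 - j) hltp
        rw [show c.length - 1 - (c.length - 1 - j) = j by omega, pvS_j,
          pvS_of_ne c _ _ _ (by omega) hpk2] at h
        exact hgk ((hop.symm.trans h).symm.trans hj1)
      refine ⟨by omega, Or.inr ?_⟩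
      rw [show c.length / 2 = j by omega]
      exact hj1
    by_cases h2 : j = k
    · -- the swap moves position k towards a smaller index: impossible
      subst h2
      exfalso
      have h := hp j hk
      rw [pvS_j, pvS_of_ne c _ _ _ (by omega) (by omega)] at h
      have hilt : i < c.length / 2 := by omega
      have hoi := honly i hilt (by omega)
      have h3 := hp i hilt
      rw [pvS_i c _ _ (by omega), pvS_of_ne c _ _ _ (by omega) (by omega)] at h3
      exact hgk (h3.trans (hoi.symm.trans h))
    by_cases h3 : i = c.length - 1 - k
    · -- the swap moves position n-1-k towards a larger index: impossible
      exfalso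
      have h := hp k hk
      rw [← h3, pvS_of_ne c _ _ _ (by omega) (by omega), pvS_i c _ _ (by omega)] at h
      have hplt : c.length - 1 - j < c.length / 2 := by omega
      have hpk2 : c.length - 1 - j ≠ k := by omega
      have hop := honly (c.length - 1 - j) hplt hpk2
      rw [show c.length - 1 - (c.length - 1 - j) = j by omega] at hop
      have h4 := hp (c.length - 1 - j) hplt
      rw [show c.length - 1 - (c.length - 1 - j) = j by omega, pvS_j,
        pvS_of_ne c _ _ _ (by omega) (by omega)] at h4
      exact hgk ((h.trans (hop.symm.trans h4)).trans (by rw [h3]))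
    by_cases h4 : j = c.length - 1 - k
    · -- the swap puts the middle into position n-1-k
      subst h4
      have h := hp k hk
      rw [pvS_of_ne c _ _ _ (by omega) (by omega), pvS_j] at h
      by_cases hilt : i < c.length / 2
      · exfalso
        have hoi := honly i hilt (by omega)
        have h5 := hp i hilt
        rw [pvS_i c _ _ (by omega), pvS_of_ne c _ _ _ (by omega) (by omega)] at h5
        exact hgk (h.trans (hoi.trans h5.symm))
      · by_cases hplt : c.length - 1 - i < c.length / 2
        · exfalso
          have hpk2 : c.length - 1 - i ≠ k := by
            intro he
            exact h3 (by omega)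
          have hop := honly (c.length - 1 - i) hplt hpk2
          rw [show c.length - 1 - (c.length - 1 - i) = i by omega] at hop
          have h6 := hp (c.length - 1 - i) hplt
          rw [show c.length - 1 - (c.length - 1 - i) = i by omega,
            pvS_of_ne c _ _ _ (by omega) (by omega), pvS_i c _ _ (by omega)] at h6
          exact hgk (h.trans (hop.symm.trans h6))
        · refine ⟨by omega, Or.inl ?_⟩
          rw [show c.length / 2 = i by omega]
          exact h.symm
    · exfalso
      rcases hF1 k hkm with (h | h) | (h | h)
      · exact h1 h.symm
      · exact h3 h.symm
      · exact h2 h.symm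
      · exact h4 h.symm
  · -- exactly two mismatched pairs
    have hkm : k ∈ pvBad c := by rw [hb]; exact List.mem_cons_self
    have hkm2 : k2 ∈ pvBad c := by rw [hb]; exact List.mem_cons_of_mem _ List.mem_cons_self
    obtain ⟨hk, hgk⟩ := (mem_pvBad c k).1 hkm
    obtain ⟨hk2, hgk2⟩ := (mem_pvBad c k2).1 hkm2
    have hlt : k < k2 := by
      have hpw := pvBad_pairwise c
      rw [hb] at hpw
      exact (List.pairwise_cons.1 hpw).1 k2 List.mem_cons_self
    rcases hF1 k hkm with (hA | hA) | (hA | hA) <;>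
      rcases hF1 k2 hkm2 with (hB | hB) | (hB | hB)
    · omega
    · omega
    · -- i = k, j = k2: crossed ends
      refine Or.inr ⟨?_, ?_⟩
      · have e2 := hp k2 hk2
        rw [← hA, ← hB, pvS_j, pvS_of_ne c _ _ _ (by omega) (by omega)] at e2
        exact e2
      · have e1 := hp k hk
        rw [← hA, ← hB, pvS_i c _ _ (by omega),
          pvS_of_ne c _ _ _ (by omega) (by omega)] at e1
        exact e1
    · -- i = k, j = n-1-k2: aligned ends
      refine Or.inl ⟨?_, ?_⟩
      · have e2 := hp k2 hk2
        rw [← hA, ← hB, pvS_of_ne c _ _ _ (by omega) (by omega), pvS_j] at e2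
        exact e2.symm
      · have e1 := hp k hk
        rw [← hA, ← hB, pvS_i c _ _ (by omega),
          pvS_of_ne c _ _ _ (by omega) (by omega)] at e1
        exact e1.symm
    · omega
    · omega
    · omega
    · omega
    · omega
    · omega
    · omega
    · omega
    · -- i = k2, j = n-1-k: aligned ends
      refine Or.inl ⟨?_, ?_⟩
      · have e1 := hp k hk
        rw [← hA, ← hB, pvS_of_ne c _ _ _ (by omega) (by omega), pvS_j] at e1
        exact e1
      · have e2 := hp k2 hk2
        rw [← hA, ← hB, pvS_i c _ _ (by omega),
          pvS_of_ne c _ _ _ (by omega) (by omega)] at e2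
        exact e2
    · -- i = n-1-k2, j = n-1-k: crossed ends
      refine Or.inr ⟨?_, ?_⟩
      · have e1 := hp k hk
        rw [← hA, ← hB, pvS_of_ne c _ _ _ (by omega) (by omega), pvS_j] at e1
        exact e1
      · have e2 := hp k2 hk2
        rw [← hA, ← hB, pvS_of_ne c _ _ _ (by omega) (by omega),
          pvS_i c _ _ (by omega)] at e2
        exact e2
    · omega
    · omega
  · -- three or more mismatched pairs: impossible
    exfalso
    have hkm : k ∈ pvBad c := by rw [hb]; simp
    have hkm2 : k2 ∈ pvBad c := by rw [hb]; simp
    have hkm3 : k3 ∈ pvBad c := by rw [hb]; simp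
    obtain ⟨hk, -⟩ := (mem_pvBad c k).1 hkm
    obtain ⟨hk2, -⟩ := (mem_pvBad c k2).1 hkm2
    obtain ⟨hk3, -⟩ := (mem_pvBad c k3).1 hkm3
    have hpw := pvBad_pairwise c
    rw [hb] at hpw
    have h12 : k < k2 := (List.pairwise_cons.1 hpw).1 k2 (by simp)
    have h13 : k < k3 := (List.pairwise_cons.1 hpw).1 k3 (by simp)
    have h23 : k2 < k3 :=
      (List.pairwise_cons.1 (List.pairwise_cons.1 hpw).2).1 k3 (by simp)
    rcases hF1 k hkm with (h | h) | (h | h) <;>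
      rcases hF1 k2 hkm2 with (h' | h') | (h' | h') <;>
        rcases hF1 k3 hkm3 with (h'' | h'') | (h'' | h'') <;> omega

-- backward: B's condition yields a palindromizing swap
lemma backward (c : List Char) (hne : c ≠ []) (hC : pvCond c) :
    ∃ i j, i < c.length ∧ i ≤ j ∧ j < c.length ∧ pvPal (pvSwap c i j) := by
  have hn : 0 < c.length := List.length_pos_iff.2 hne
  unfold pvCond at hC
  rcases hb : pvBad c with _ | ⟨k, _ | ⟨k2, _ | ⟨k3, rest⟩⟩⟩ <;> rw [hb] at hC
  · -- no mismatched pair: the identity swap (0,0) works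
    refine ⟨0, 0, hn, le_refl 0, hn, ?_⟩
    rw [pal_swap_iff c 0 0 hn hn]
    intro p hp
    have hS : ∀ t, pvS c 0 0 t = c.getD t ' ' := by
      intro t; unfold pvS; split_ifs <;> simp_all
    rw [hS, hS]
    exact not_bad c p hp (by rw [hb]; exact List.not_mem_nil)
  · -- one mismatched pair (k, n-1-k): swap the middle into one of its ends
    obtain ⟨hodd, hmid⟩ := hC
    have hkm : k ∈ pvBad c := by rw [hb]; exact List.mem_singleton_self k
    obtain ⟨hk, hgk⟩ := (mem_pvBad c k).1 hkm
    have honly : ∀ p, p < c.length / 2 → p ≠ k →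
        c.getD p ' ' = c.getD (c.length - 1 - p) ' ' := by
      intro p hp hpk
      exact not_bad c p hp (by rw [hb]; simp [hpk])
    rcases hmid with h | h
    · -- middle char equals left end: swap (n/2, n-1-k)
      refine ⟨c.length / 2, c.length - 1 - k, by omega, by omega, by omega, ?_⟩
      rw [pal_swap_iff c _ _ (by omega) (by omega)]
      intro p hp
      by_cases hpk : p = k
      · subst hpk
        rw [pvS_of_ne c _ _ _ (by omega) (by omega), pvS_j]
        exact h.symm
      · rw [pvS_of_ne c _ _ _ (by omega) (by omega),
          pvS_of_ne c _ _ _ (by omega) (by omega)]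
        exact honly p hp hpk
    · -- middle char equals right end: swap (k, n/2)
      refine ⟨k, c.length / 2, by omega, by omega, by omega, ?_⟩
      rw [pal_swap_iff c _ _ (by omega) (by omega)]
      intro p hp
      by_cases hpk : p = k
      · subst hpk
        rw [pvS_i c _ _ (by omega), pvS_of_ne c _ _ _ (by omega) (by omega)]
        exact h
      · rw [pvS_of_ne c _ _ _ (by omega) (by omega),
          pvS_of_ne c _ _ _ (by omega) (by omega)]
        exact honly p hp hpk
  · -- two mismatched pairs: swap an end of one into an end of the other
    have hkm : k ∈ pvBad c := by rw [hb]; exact List.mem_cons_self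
    have hkm2 : k2 ∈ pvBad c := by rw [hb]; exact List.mem_cons_of_mem _ List.mem_cons_self
    obtain ⟨hk, hgk⟩ := (mem_pvBad c k).1 hkm
    obtain ⟨hk2, hgk2⟩ := (mem_pvBad c k2).1 hkm2
    have hlt : k < k2 := by
      have hpw := pvBad_pairwise c
      rw [hb] at hpw
      exact (List.pairwise_cons.1 hpw).1 k2 List.mem_cons_self
    have honly : ∀ p, p < c.length / 2 → p ≠ k → p ≠ k2 →
        c.getD p ' ' = c.getD (c.length - 1 - p) ' ' := by
      intro p hp hp1 hp2
      exact not_bad c p hp (by rw [hb]; simp [hp1, hp2])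
    rcases hC with ⟨hA, hB⟩ | ⟨hA, hB⟩
    · -- equal left ends / equal right ends: swap (k, n-1-k2)
      refine ⟨k, c.length - 1 - k2, by omega, by omega, by omega, ?_⟩
      rw [pal_swap_iff c _ _ (by omega) (by omega)]
      intro p hp
      by_cases hp1 : p = k
      · subst hp1
        rw [pvS_i c _ _ (by omega), pvS_of_ne c _ _ _ (by omega) (by omega)]
        exact hB.symm
      · by_cases hp2 : p = k2
        · subst hp2
          rw [pvS_of_ne c _ _ _ (by omega) (by omega), pvS_j]
          exact hA.symm
        · rw [pvS_of_ne c _ _ _ (by omega) (by omega),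
            pvS_of_ne c _ _ _ (by omega) (by omega)]
          exact honly p hp hp1 hp2
    · -- crossed ends: swap (k, k2)
      refine ⟨k, k2, by omega, by omega, by omega, ?_⟩
      rw [pal_swap_iff c _ _ (by omega) (by omega)]
      intro p hp
      by_cases hp1 : p = k
      · subst hp1
        rw [pvS_i c _ _ (by omega), pvS_of_ne c _ _ _ (by omega) (by omega)]
        exact hB
      · by_cases hp2 : p = k2
        · subst hp2
          rw [pvS_j, pvS_of_ne c _ _ _ (by omega) (by omega)]
          exact hA
        · rw [pvS_of_ne c _ _ _ (by omega) (by omega),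
            pvS_of_ne c _ _ _ (by omega) (by omega)]
          exact honly p hp hp1 hp2
  · exact hC.elim

-- ===== VERDICT (by name: the statement is the Claim_ definition above) =====
theorem isOneSwapEnough_spec : Claim_unchanged_isOneSwapEnough := by
  intro s _ hD
  have hne : s.toList ≠ [] := fun h => hD (String.toList_eq_nil_iff.mp h)
  apply Bool.eq_iff_iff.2
  rw [isOneSwapEnough_iff, alt_iff]
  constructor
  · rintro ⟨i, j, hi, hij, hj, hp⟩; exact forward s.toList i j hi hij hj hp
  · exact backward s.toList hne

theorem isOneSwapEnough_changed : Claim_changed_isOneSwapEnough := by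
  unfold Claim_changed_isOneSwapEnough; decide

theorem isOneSwapEnough_tight : Claim_exact_isOneSwapEnough := by
  intro s _ hD
  subst hD; decide
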